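-- pv_equiv track=rewrite | github.com/kuboschek/advent-of-code | 2024/14/2.py | check_christmas_tree
-- ===== SOURCE A (Python) =====
-- def check_christmas_tree(positions, width, height):
--     tree_pattern = [
--         "....*....",
--         "...***...",
--         "..*****..",
--         ".*******.",
--         "*********",
--         "....*....",
--         "....*...."
--     ]
--     tree_height = len(tree_pattern)
--     tree_width = len(tree_pattern[0])
--
--     for y in range(height - tree_height + 1):
--         for x in range(width - tree_width + 1):
--             match = True
--             for dy in range(tree_height):
--                 for dx in range(tree_width):
--                     if tree_pattern[dy][dx] == '*' and (x + dx, y + dy) not in positions: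
--                         match = False
--                         break
--                 if not match:
--                     break
--             if match:
--                 return True
--     return False
-- ===== SOURCE B (Python) =====
-- _STARS = [(4, 0), (3, 1), (4, 1), (5, 1), (2, 2), (3, 2), (4, 2), (5, 2), (6, 2),
--           (1, 3), (2, 3), (3, 3), (4, 3), (5, 3), (6, 3), (7, 3),
--           (0, 4), (1, 4), (2, 4), (3, 4), (4, 4), (5, 4), (6, 4), (7, 4), (8, 4),
--           (4, 5), (4, 6)]
--
--
-- def check_christmas_tree(positions, width, height):
--     # Anchor on the tree's tip: any match must have its tip star at some point
--     # of `positions`, so only |positions| candidate origins need checking.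
--     for (px, py) in positions:
--         x, y = px - 4, py
--         if 0 <= x <= width - 9 and 0 <= y <= height - 7 \
--            and all((x + dx, y + dy) in positions for dx, dy in _STARS):
--             return True
--     return False
-- ===== Notes on version B (the rewrite author's own statement) =====
-- stated objective: faster
-- what changed: Instead of scanning every grid origin (all y in range(height-6), x in range(width-8)) and testing the pattern there, B anchors on the tree's tip star: each point of `positions` yields the single candidate origin (px-4, py), which is bounds-checked and tested against a precomputed list of the 27 star offsets.
import Mathlib
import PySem

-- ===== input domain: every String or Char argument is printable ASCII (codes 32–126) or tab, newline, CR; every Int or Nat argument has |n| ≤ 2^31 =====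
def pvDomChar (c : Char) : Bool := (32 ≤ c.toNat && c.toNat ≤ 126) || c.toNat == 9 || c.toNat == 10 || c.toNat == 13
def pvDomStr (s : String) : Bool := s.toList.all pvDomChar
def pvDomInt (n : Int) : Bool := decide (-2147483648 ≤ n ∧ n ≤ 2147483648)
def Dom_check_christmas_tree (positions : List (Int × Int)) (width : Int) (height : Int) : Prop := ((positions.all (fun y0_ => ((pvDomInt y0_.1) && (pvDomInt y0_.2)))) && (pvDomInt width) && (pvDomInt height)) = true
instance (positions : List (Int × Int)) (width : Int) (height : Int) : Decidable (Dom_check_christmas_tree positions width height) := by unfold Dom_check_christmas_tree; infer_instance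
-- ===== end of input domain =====

-- B anchors the search on the tree's tip star at each point of `positions`
-- instead of scanning every grid origin: objective = faster (fewer candidate origins).

-- ===== PORT A =====
def pvTreePattern : List String :=
  ["....*....",
   "...***...",
   "..*****..",
   ".*******.",
   "*********",
   "....*....",
   "....*...."]

-- tree_pattern[dy][dx] == '*'  (dy, dx always in range here, so pyGet? is some)
def pvStarAt (dy dx : Int) : Bool :=
  ((PySem.List.pyGet? pvTreePattern dy).bind (fun row => PySem.Str.pyGet? row dx)) == some '*'

-- the two inner loops of A: match stays true unless a star cell is missing (break = all)
def pvMatchAt (positions : List (Int × Int)) (x y : Int) : Bool :=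
  (PySem.List.pyRange 0 7 1).all fun dy =>
    (PySem.List.pyRange 0 9 1).all fun dx =>
      !(pvStarAt dy dx && !(PySem.Set.contains positions (x + dx, y + dy)))

def check_christmas_tree (positions : List (Int × Int)) (width : Int) (height : Int) : Bool :=
  (PySem.List.pyRange 0 (height - 7 + 1) 1).any fun y =>
    (PySem.List.pyRange 0 (width - 9 + 1) 1).any fun x =>
      pvMatchAt positions x y

-- ===== PORT B =====
def pvStars : List (Int × Int) :=
  [(4, 0), (3, 1), (4, 1), (5, 1), (2, 2), (3, 2), (4, 2), (5, 2), (6, 2),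
   (1, 3), (2, 3), (3, 3), (4, 3), (5, 3), (6, 3), (7, 3),
   (0, 4), (1, 4), (2, 4), (3, 4), (4, 4), (5, 4), (6, 4), (7, 4), (8, 4),
   (4, 5), (4, 6)]

def check_christmas_tree_alt (positions : List (Int × Int)) (width : Int) (height : Int) : Bool :=
  positions.any fun p =>
    let x := p.1 - 4
    let y := p.2
    decide (0 ≤ x) && decide (x ≤ width - 9) && decide (0 ≤ y) && decide (y ≤ height - 7) &&
      pvStars.all fun d => PySem.Set.contains positions (x + d.1, y + d.2)

-- ===== PRECONDITION & SPEC =====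
def Spec_check_christmas_tree (positions : List (Int × Int)) (width : Int) (height : Int) (out : Bool) : Prop := out = check_christmas_tree_alt positions width height
instance (positions : List (Int × Int)) (width : Int) (height : Int) (out : Bool) : Decidable (Spec_check_christmas_tree positions width height out) := by unfold Spec_check_christmas_tree; infer_instance

-- ===== CLAIM (what is proved, stated in full; the proofs are below) =====
def Claim_equal_check_christmas_tree : Prop := ∀ (positions : List (Int × Int)) (width : Int) (height : Int), Dom_check_christmas_tree positions width height → Spec_check_christmas_tree positions width height (check_christmas_tree positions width height)

-- ===== LEMMAS AND PROOFS =====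

-- every star cell of the literal pattern, and nothing else, is in pvStars
lemma pv_star_table :
    ∀ dy ∈ PySem.List.pyRange 0 7 1, ∀ dx ∈ PySem.List.pyRange 0 9 1,
      (pvStarAt dy dx = true ↔ (dx, dy) ∈ pvStars) := by decide

lemma pv_stars_in_range :
    ∀ d ∈ pvStars, d.1 ∈ PySem.List.pyRange 0 9 1 ∧ d.2 ∈ PySem.List.pyRange 0 7 1 := by decide

lemma pv_matchAt_eq (ps : List (Int × Int)) (x y : Int) :
    pvMatchAt ps x y = pvStars.all (fun d => PySem.Set.contains ps (x + d.1, y + d.2)) := by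
  rw [Bool.eq_iff_iff]
  simp only [pvMatchAt, List.all_eq_true, Bool.not_eq_true', Bool.and_eq_false_iff,
    Bool.not_eq_false']
  constructor
  · intro h d hd
    obtain ⟨hx, hy⟩ := pv_stars_in_range d hd
    rcases h d.2 hy d.1 hx with hs | hc
    · have hst := (pv_star_table d.2 hy d.1 hx).mpr (by simpa using hd)
      simp [hs] at hst
    · exact hc
  · intro h dy hdy dx hdx
    by_cases hs : pvStarAt dy dx = true
    · exact Or.inr (h (dx, dy) ((pv_star_table dy hdy dx hdx).mp hs))
    · exact Or.inl (by simpa using hs)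

lemma pv_tip_mem : ((4 : Int), (0 : Int)) ∈ pvStars := by decide

-- ===== VERDICT (by name: the statement is the Claim_ definition above) =====
theorem check_christmas_tree_spec : Claim_equal_check_christmas_tree := by
  intro positions width height _
  unfold Spec_check_christmas_tree
  rw [Bool.eq_iff_iff]
  simp only [check_christmas_tree, check_christmas_tree_alt, List.any_eq_true,
    pv_matchAt_eq, PySem.List.mem_pyRange_one, List.all_eq_true, Bool.and_eq_true,
    decide_eq_true_eq, PySem.Set.contains_iff]
  constructor
  · rintro ⟨y, ⟨hy0, hy1⟩, x, ⟨hx0, hx1⟩, hall⟩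
    refine ⟨(x + 4, y), ?_, ⟨⟨⟨by omega, by omega⟩, by omega⟩, by omega⟩, ?_⟩
    · have := hall (4, 0) pv_tip_mem
      simpa using this
    · intro d hd
      have := hall d hd
      have hx4 : x + 4 - 4 = x := by ring
      simpa [hx4] using this
  · rintro ⟨p, hp, ⟨⟨⟨h1, h2⟩, h3⟩, h4⟩, hall⟩
    exact ⟨p.2, ⟨by omega, by omega⟩, p.1 - 4, ⟨by omega, by omega⟩, hall⟩
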